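-- pv_equiv track=rewrite | github.com/siberianbearofficial/lint-gost-tex | src/lint_gost_tex/tex.py | _scan_skip_command_args
-- ===== SOURCE A (Python) =====
-- def is_escaped(text: str, index: int) -> bool:
--     backslashes = 0
--     pos = index - 1
--     while pos >= 0 and text[pos] == "\\":
--         backslashes += 1
--         pos -= 1
--     return (backslashes % 2) == 1
--
-- def find_matching_brace(text: str, start: int) -> int | None:
--     if start >= len(text) or text[start] != "{":
--         return None
--     depth = 0
--     index = start
--     while index < len(text):
--         char = text[index]
--         if char == "{" and not is_escaped(text, index):
--             depth += 1
--         elif char == "}" and not is_escaped(text, index):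
--             depth -= 1
--             if depth == 0:
--                 return index
--         index += 1
--     return None
--
-- def find_matching_bracket(text: str, start: int) -> int | None:
--     if start >= len(text) or text[start] != "[":
--         return None
--     depth = 0
--     index = start
--     while index < len(text):
--         char = text[index]
--         if char == "[" and not is_escaped(text, index):
--             depth += 1
--         elif char == "]" and not is_escaped(text, index):
--             depth -= 1
--             if depth == 0:
--                 return index
--         index += 1
--     return None
--
-- def _skip_whitespace(text: str, index: int) -> int:
--     while index < len(text) and text[index].isspace():
--         index += 1
--     return index
--
-- def _scan_skip_optional(text: str, index: int) -> int:
--     index = _skip_whitespace(text, index)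
--     if index < len(text) and text[index] == "[":
--         end = find_matching_bracket(text, index)
--         if end is None:
--             return index
--         return end + 1
--     return index
--
-- def _scan_skip_command_args(text: str, index: int, command: str, skip_two_args: set[str]) -> int:
--     index = _scan_skip_optional(text, index)
--     args_to_skip = 2 if command in skip_two_args else 1
--     for _ in range(args_to_skip):
--         index = _skip_whitespace(text, index)
--         if index < len(text) and text[index] == "{":
--             end = find_matching_brace(text, index)
--             if end is None:
--                 return index + 1
--             index = end + 1
--         else:
--             break
--     return index
-- ===== SOURCE B (Python) =====
-- def _scan_skip_command_args(text: str, index: int, command: str, skip_two_args: set[str]) -> int: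
--     n = len(text)
--
--     def skip_ws(i: int) -> int:
--         while i < n and text[i].isspace():
--             i += 1
--         return i
--
--     def match_group(start: int, open_ch: str, close_ch: str):
--         # Is the character at `start` escaped? One backward run over the
--         # backslash block just before it (done once, not per character).
--         esc = False
--         j = start - 1
--         while j >= 0 and text[j] == "\\":
--             esc = not esc
--             j -= 1
--         # Single forward pass carrying the escape-parity flag.
--         depth = 0
--         for i in range(start, n):
--             c = text[i]
--             if not esc:
--                 if c == open_ch:
--                     depth += 1
--                 elif c == close_ch:
--                     depth -= 1
--                     if depth == 0:
--                         return i
--             esc = (c == "\\") and not esc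
--         return None
--
--     index = skip_ws(index)
--     if index < n and text[index] == "[":
--         end = match_group(index, "[", "]")
--         if end is not None:
--             index = end + 1
--     for _ in range(2 if command in skip_two_args else 1):
--         index = skip_ws(index)
--         if index < n and text[index] == "{":
--             end = match_group(index, "{", "}")
--             if end is None:
--                 return index + 1
--             index = end + 1
--         else:
--             break
--     return index
-- ===== Notes on version B (the rewrite author's own statement) =====
-- stated objective: alternative
-- what changed: A re-scans the preceding backslash run at every character (is_escaped) and duplicates the matcher for braces and brackets; B computes the escape parity once per group and carries it forward through a single generic one-pass matcher.
-- outside the precondition, e.g. on _scan_skip_command_args('{[]a\\}]', -7, 'x', {'x'}): A returns -1, B returns -6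
import Mathlib
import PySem

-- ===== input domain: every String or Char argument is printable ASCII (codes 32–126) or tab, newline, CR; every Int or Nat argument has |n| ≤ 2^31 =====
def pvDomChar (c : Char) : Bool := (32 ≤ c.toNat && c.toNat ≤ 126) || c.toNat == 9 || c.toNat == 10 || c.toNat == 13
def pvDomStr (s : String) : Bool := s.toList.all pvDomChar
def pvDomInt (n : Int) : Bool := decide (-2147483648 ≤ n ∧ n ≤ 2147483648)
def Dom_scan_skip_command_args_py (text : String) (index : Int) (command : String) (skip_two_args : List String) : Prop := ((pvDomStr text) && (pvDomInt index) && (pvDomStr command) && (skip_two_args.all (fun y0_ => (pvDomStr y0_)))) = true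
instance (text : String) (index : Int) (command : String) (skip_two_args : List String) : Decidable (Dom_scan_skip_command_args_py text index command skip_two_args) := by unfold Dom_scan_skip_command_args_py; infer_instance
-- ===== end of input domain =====

-- B replaces A's per-character backward `is_escaped` scan by a single forward pass carrying a
-- backslash-parity flag, and merges A's two duplicated brace/bracket matchers into one.

-- shared trivial char-access helper: text[i] (Python wraparound); default never read inside Pre_
def pyCharAt (cs : List Char) (i : Int) : Char := (PySem.List.pyGet? cs i).getD '\x00'

-- ===== PORT A =====
-- is_escaped: while pos >= 0 and text[pos] == '\\': backslashes += 1;  return backslashes % 2 == 1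
def escGoA (cs : List Char) (pos backslashes : Int) : Int :=
  if h : 0 ≤ pos ∧ pyCharAt cs pos = '\\' then escGoA cs (pos - 1) (backslashes + 1)
  else backslashes
termination_by (pos + 1).toNat
decreasing_by obtain ⟨h1, -⟩ := h; omega

def isEscapedA (cs : List Char) (index : Int) : Bool :=
  escGoA cs (index - 1) 0 % 2 == 1

-- find_matching_brace's while loop
def braceGoA (cs : List Char) (i depth : Int) : Option Int :=
  if h : i < (cs.length : Int) then
    let c := pyCharAt cs i
    if (c == '{') && !isEscapedA cs i then braceGoA cs (i + 1) (depth + 1)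
    else if (c == '}') && !isEscapedA cs i then
      if depth - 1 == 0 then some i else braceGoA cs (i + 1) (depth - 1)
    else braceGoA cs (i + 1) depth
  else none
termination_by ((cs.length : Int) - i).toNat
decreasing_by all_goals omega

def findMatchingBraceA (cs : List Char) (start : Int) : Option Int :=
  if (cs.length : Int) ≤ start ∨ ¬ pyCharAt cs start = '{' then none
  else braceGoA cs start 0

-- find_matching_bracket's while loop (a second, duplicated matcher in A)
def bracketGoA (cs : List Char) (i depth : Int) : Option Int :=
  if h : i < (cs.length : Int) then
    let c := pyCharAt cs i
    if (c == '[') && !isEscapedA cs i then bracketGoA cs (i + 1) (depth + 1)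
    else if (c == ']') && !isEscapedA cs i then
      if depth - 1 == 0 then some i else bracketGoA cs (i + 1) (depth - 1)
    else bracketGoA cs (i + 1) depth
  else none
termination_by ((cs.length : Int) - i).toNat
decreasing_by all_goals omega

def findMatchingBracketA (cs : List Char) (start : Int) : Option Int :=
  if (cs.length : Int) ≤ start ∨ ¬ pyCharAt cs start = '[' then none
  else bracketGoA cs start 0

def skipWsA (cs : List Char) (i : Int) : Int :=
  if h : i < (cs.length : Int) ∧ PySem.Chars.isspace (pyCharAt cs i) = true then skipWsA cs (i + 1)
  else i
termination_by ((cs.length : Int) - i).toNat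
decreasing_by obtain ⟨h1, -⟩ := h; omega

def scanSkipOptionalA (cs : List Char) (index : Int) : Int :=
  let i := skipWsA cs index
  if i < (cs.length : Int) ∧ pyCharAt cs i = '[' then
    match findMatchingBracketA cs i with
    | none => i
    | some e => e + 1
  else i

-- for _ in range(args_to_skip): …
def argsGoA (cs : List Char) : Nat → Int → Int
  | 0, i => i
  | k + 1, i =>
    let j := skipWsA cs i
    if j < (cs.length : Int) ∧ pyCharAt cs j = '{' then
      match findMatchingBraceA cs j with
      | none => j + 1
      | some e => argsGoA cs k (e + 1)
    else j

def scan_skip_command_args_py (text : String) (index : Int) (command : String) (skip_two_args : List String) : Int :=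
  let cs := text.toList
  let i := scanSkipOptionalA cs index
  let args : Nat := if skip_two_args.contains command then 2 else 1
  argsGoA cs args i

-- ===== PORT B =====
-- initial escape parity: one backward run over the backslash block just before `start`
def initEscB (cs : List Char) (j : Int) (esc : Bool) : Bool :=
  if h : 0 ≤ j ∧ pyCharAt cs j = '\\' then initEscB cs (j - 1) (!esc)
  else esc
termination_by (j + 1).toNat
decreasing_by obtain ⟨h1, -⟩ := h; omega

-- single forward pass carrying the escape-parity flag
def fwdGoB (cs : List Char) (oc cc : Char) (i depth : Int) (esc : Bool) : Option Int :=
  if h : i < (cs.length : Int) then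
    let c := pyCharAt cs i
    let depth' := if !esc && (c == oc) then depth + 1
                  else if !esc && (c == cc) then depth - 1
                  else depth
    if !esc && (c == cc) && (depth' == 0) then some i
    else fwdGoB cs oc cc (i + 1) depth' ((c == '\\') && !esc)
  else none
termination_by ((cs.length : Int) - i).toNat
decreasing_by omega

def matchGroupB (cs : List Char) (oc cc : Char) (start : Int) : Option Int :=
  fwdGoB cs oc cc start 0 (initEscB cs (start - 1) false)

def skipWsB (cs : List Char) (i : Int) : Int :=
  if h : i < (cs.length : Int) ∧ PySem.Chars.isspace (pyCharAt cs i) = true then skipWsB cs (i + 1)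
  else i
termination_by ((cs.length : Int) - i).toNat
decreasing_by obtain ⟨h1, -⟩ := h; omega

def argsGoB (cs : List Char) : Nat → Int → Int
  | 0, i => i
  | k + 1, i =>
    let j := skipWsB cs i
    if j < (cs.length : Int) ∧ pyCharAt cs j = '{' then
      match matchGroupB cs '{' '}' j with
      | none => j + 1
      | some e => argsGoB cs k (e + 1)
    else j

def scan_skip_command_args_py_alt (text : String) (index : Int) (command : String) (skip_two_args : List String) : Int :=
  let cs := text.toList
  let i0 := skipWsB cs index
  let i1 :=
    if i0 < (cs.length : Int) ∧ pyCharAt cs i0 = '[' then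
      match matchGroupB cs '[' ']' i0 with
      | none => i0
      | some e => e + 1
    else i0
  argsGoB cs (if skip_two_args.contains command then 2 else 1) i1

-- ===== PRECONDITION & SPEC =====
-- Pre_ restricts to the natural domain 0 ≤ index (a scan position): for negative index Python's
-- negative-index wraparound makes A read characters from the end of the text, which B does not mimic
-- (and A raises IndexError for index < -len(text) on nonempty text).
def Pre_scan_skip_command_args_py (text : String) (index : Int) (command : String) (skip_two_args : List String) : Prop := 0 ≤ index
instance (text : String) (index : Int) (command : String) (skip_two_args : List String) : Decidable (Pre_scan_skip_command_args_py text index command skip_two_args) := by unfold Pre_scan_skip_command_args_py; infer_instance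

def pvWitness_scan_skip_command_args_py : String × Int × String × List String := ("[x] {a\\}b} {c}", 0, "frac", ["frac"])

def Spec_scan_skip_command_args_py (text : String) (index : Int) (command : String) (skip_two_args : List String) (out : Int) : Prop := out = scan_skip_command_args_py_alt text index command skip_two_args
instance (text : String) (index : Int) (command : String) (skip_two_args : List String) (out : Int) : Decidable (Spec_scan_skip_command_args_py text index command skip_two_args out) := by unfold Spec_scan_skip_command_args_py; infer_instance

-- ===== CLAIM (what is proved, stated in full; the proofs are below) =====
def Claim_equal_scan_skip_command_args_py : Prop := ∀ (text : String) (index : Int) (command : String) (skip_two_args : List String), Dom_scan_skip_command_args_py text index command skip_two_args → Pre_scan_skip_command_args_py text index command skip_two_args → Spec_scan_skip_command_args_py text index command skip_two_args (scan_skip_command_args_py text index command skip_two_args)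

-- ===== LEMMAS AND PROOFS =====

lemma escGoA_add (cs : List Char) (n : Nat) :
    ∀ pos b, (pos + 1).toNat ≤ n → escGoA cs pos b = escGoA cs pos 0 + b := by
  induction n with
  | zero =>
    intro pos b h
    have hneg : ¬ (0 ≤ pos ∧ pyCharAt cs pos = '\\') := by rintro ⟨h1, -⟩; omega
    conv_lhs => rw [escGoA]
    conv_rhs => rw [escGoA]
    rw [dif_neg hneg, dif_neg hneg]; ring
  | succ n ih =>
    intro pos b h
    conv_lhs => rw [escGoA]
    conv_rhs => rw [escGoA]
    split_ifs with hc
    · obtain ⟨h1, -⟩ := hc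
      rw [ih (pos - 1) (b + 1) (by omega), ih (pos - 1) (0 + 1) (by omega)]
      ring
    · ring

lemma isEscapedA_succ (cs : List Char) (i : Int) (hi : 0 ≤ i) :
    isEscapedA cs (i + 1) = ((pyCharAt cs i == '\\') && !isEscapedA cs i) := by
  unfold isEscapedA
  have h1 : i + 1 - 1 = i := by ring
  rw [h1]
  conv_lhs => rw [escGoA]
  by_cases hc : pyCharAt cs i = '\\'
  · rw [dif_pos ⟨hi, hc⟩, escGoA_add cs (i - 1 + 1).toNat (i - 1) (0 + 1) le_rfl]
    have h2 : escGoA cs (i - 1) 0 % 2 = 0 ∨ escGoA cs (i - 1) 0 % 2 = 1 := by omega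
    rcases h2 with hp | hp
    · simp [hc, hp] <;> omega
    · simp [hc, hp] <;> omega
  · have hn : ¬ (0 ≤ i ∧ pyCharAt cs i = '\\') := by rintro ⟨-, h⟩; exact hc h
    simp [hn, hc]

lemma initEscB_eq (cs : List Char) (n : Nat) :
    ∀ j e, (j + 1).toNat ≤ n → initEscB cs j e = (e != (escGoA cs j 0 % 2 == 1)) := by
  induction n with
  | zero =>
    intro j e h
    have hneg : ¬ (0 ≤ j ∧ pyCharAt cs j = '\\') := by rintro ⟨h1, -⟩; omega
    rw [initEscB]
    conv_rhs => rw [escGoA]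
    simp [hneg]
  | succ n ih =>
    intro j e h
    rw [initEscB]
    conv_rhs => rw [escGoA]
    split_ifs with hc
    · obtain ⟨h1, -⟩ := hc
      rw [ih (j - 1) (!e) (by omega),
        escGoA_add cs (j - 1 + 1).toNat (j - 1) (0 + 1) le_rfl]
      have h2 : escGoA cs (j - 1) 0 % 2 = 0 ∨ escGoA cs (j - 1) 0 % 2 = 1 := by omega
      rcases h2 with hp | hp
      · cases e <;> simp [hp] <;> omega
      · cases e <;> simp [hp] <;> omega
    · simp

lemma initEscB_isEscaped (cs : List Char) (start : Int) :
    initEscB cs (start - 1) false = isEscapedA cs start := by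
  rw [initEscB_eq cs (start - 1 + 1).toNat (start - 1) false le_rfl]
  unfold isEscapedA
  cases h : (escGoA cs (start - 1) 0 % 2 == 1) <;> simp [h]

lemma braceGoA_eq_fwdGoB (cs : List Char) (n : Nat) :
    ∀ i depth, 0 ≤ i → ((cs.length : Int) - i).toNat ≤ n →
      braceGoA cs i depth = fwdGoB cs '{' '}' i depth (isEscapedA cs i) := by
  induction n with
  | zero =>
    intro i depth hi h
    rw [braceGoA, fwdGoB]
    have : ¬ i < (cs.length : Int) := by omega
    simp [this]
  | succ n ih =>
    intro i depth hi h
    rw [braceGoA, fwdGoB]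
    by_cases hlt : i < (cs.length : Int)
    · simp only [dif_pos hlt]
      have hsucc := isEscapedA_succ cs i hi
      by_cases hE : isEscapedA cs i = true
      · simp only [hE, Bool.not_true, Bool.and_false, Bool.false_and, if_neg (by simp : ¬ (false = true)),
          Bool.and_true]
        rw [ih (i + 1) depth (by omega) (by omega), hsucc, hE]
        simp
      · have hE' : isEscapedA cs i = false := by simpa using hE
        by_cases hob : pyCharAt cs i = '{'
        · simp only [hob, hE']
          rw [ih (i + 1) (depth + 1) (by omega) (by omega), hsucc, hob, hE']
          simp
        · by_cases hcb : pyCharAt cs i = '}'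
          · simp only [hcb, hE']
            by_cases hd : depth - 1 = 0
            · simp [hd]
            · have hd' : (depth - 1 == 0) = false := by simpa using hd
              simp only [hd']
              rw [ih (i + 1) (depth - 1) (by omega) (by omega), hsucc, hcb, hE']
              simp [hd']
          · have hob' : (pyCharAt cs i == '{') = false := by simpa using hob
            have hcb' : (pyCharAt cs i == '}') = false := by simpa using hcb
            simp only [hob', hcb', hE']
            rw [ih (i + 1) depth (by omega) (by omega), hsucc, hE']
            simp [hob', hcb']
    · simp [hlt]

lemma bracketGoA_eq_fwdGoB (cs : List Char) (n : Nat) :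
    ∀ i depth, 0 ≤ i → ((cs.length : Int) - i).toNat ≤ n →
      bracketGoA cs i depth = fwdGoB cs '[' ']' i depth (isEscapedA cs i) := by
  induction n with
  | zero =>
    intro i depth hi h
    rw [bracketGoA, fwdGoB]
    have : ¬ i < (cs.length : Int) := by omega
    simp [this]
  | succ n ih =>
    intro i depth hi h
    rw [bracketGoA, fwdGoB]
    by_cases hlt : i < (cs.length : Int)
    · simp only [dif_pos hlt]
      have hsucc := isEscapedA_succ cs i hi
      by_cases hE : isEscapedA cs i = true
      · simp only [hE, Bool.not_true, Bool.and_false, Bool.false_and, if_neg (by simp : ¬ (false = true)),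
          Bool.and_true]
        rw [ih (i + 1) depth (by omega) (by omega), hsucc, hE]
        simp
      · have hE' : isEscapedA cs i = false := by simpa using hE
        by_cases hob : pyCharAt cs i = '['
        · simp only [hob, hE']
          rw [ih (i + 1) (depth + 1) (by omega) (by omega), hsucc, hob, hE']
          simp
        · by_cases hcb : pyCharAt cs i = ']'
          · simp only [hcb, hE']
            by_cases hd : depth - 1 = 0
            · simp [hd]
            · have hd' : (depth - 1 == 0) = false := by simpa using hd
              simp only [hd']
              rw [ih (i + 1) (depth - 1) (by omega) (by omega), hsucc, hcb, hE']
              simp [hd']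
          · have hob' : (pyCharAt cs i == '[') = false := by simpa using hob
            have hcb' : (pyCharAt cs i == ']') = false := by simpa using hcb
            simp only [hob', hcb', hE']
            rw [ih (i + 1) depth (by omega) (by omega), hsucc, hE']
            simp [hob', hcb']
    · simp [hlt]


lemma bracketGoA_bound (cs : List Char) (n : Nat) :
    ∀ i depth e, ((cs.length : Int) - i).toNat ≤ n → bracketGoA cs i depth = some e → i ≤ e := by
  induction n with
  | zero =>
    intro i depth e h hs
    rw [bracketGoA] at hs
    have : ¬ i < (cs.length : Int) := by omega
    simp [this] at hs
  | succ n ih =>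
    intro i depth e h hs
    rw [bracketGoA] at hs
    by_cases hlt : i < (cs.length : Int)
    · simp only [dif_pos hlt] at hs
      split_ifs at hs with h1 h2 h3
      · have := ih (i + 1) (depth + 1) e (by omega) hs; omega
      · simp at hs; omega
      · have := ih (i + 1) (depth - 1) e (by omega) hs; omega
      · have := ih (i + 1) depth e (by omega) hs; omega
    · simp [hlt] at hs

lemma braceGoA_bound (cs : List Char) (n : Nat) :
    ∀ i depth e, ((cs.length : Int) - i).toNat ≤ n → braceGoA cs i depth = some e → i ≤ e := by
  induction n with
  | zero =>
    intro i depth e h hs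
    rw [braceGoA] at hs
    have : ¬ i < (cs.length : Int) := by omega
    simp [this] at hs
  | succ n ih =>
    intro i depth e h hs
    rw [braceGoA] at hs
    by_cases hlt : i < (cs.length : Int)
    · simp only [dif_pos hlt] at hs
      split_ifs at hs with h1 h2 h3
      · have := ih (i + 1) (depth + 1) e (by omega) hs; omega
      · simp at hs; omega
      · have := ih (i + 1) (depth - 1) e (by omega) hs; omega
      · have := ih (i + 1) depth e (by omega) hs; omega
    · simp [hlt] at hs

lemma skipWsB_eq (cs : List Char) (n : Nat) :
    ∀ i, ((cs.length : Int) - i).toNat ≤ n → skipWsB cs i = skipWsA cs i := by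
  induction n with
  | zero =>
    intro i h
    rw [skipWsB, skipWsA]
    have hneg : ¬ (i < (cs.length : Int) ∧ PySem.Chars.isspace (pyCharAt cs i) = true) := by
      rintro ⟨h1, -⟩; omega
    rw [dif_neg hneg, dif_neg hneg]
  | succ n ih =>
    intro i h
    rw [skipWsB, skipWsA]
    split_ifs with hc
    · obtain ⟨h1, -⟩ := hc
      exact ih (i + 1) (by omega)
    · rfl

lemma skipWsA_le (cs : List Char) (n : Nat) :
    ∀ i, ((cs.length : Int) - i).toNat ≤ n → i ≤ skipWsA cs i := by
  induction n with
  | zero =>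
    intro i h
    rw [skipWsA]
    have hneg : ¬ (i < (cs.length : Int) ∧ PySem.Chars.isspace (pyCharAt cs i) = true) := by
      rintro ⟨h1, -⟩; omega
    rw [dif_neg hneg]
  | succ n ih =>
    intro i h
    rw [skipWsA]
    split_ifs with hc
    · obtain ⟨h1, -⟩ := hc
      have := ih (i + 1) (by omega)
      omega
    · exact le_refl i

lemma findBrace_eq (cs : List Char) (j : Int) (h0 : 0 ≤ j) (hlt : j < (cs.length : Int))
    (hc : pyCharAt cs j = '{') : findMatchingBraceA cs j = matchGroupB cs '{' '}' j := by
  unfold findMatchingBraceA matchGroupB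
  have hneg : ¬ ((cs.length : Int) ≤ j ∨ ¬ pyCharAt cs j = '{') := by
    push_neg; exact ⟨by omega, hc⟩
  rw [if_neg hneg, initEscB_isEscaped cs j,
    braceGoA_eq_fwdGoB cs ((cs.length : Int) - j).toNat j 0 h0 le_rfl]

lemma findBracket_eq (cs : List Char) (j : Int) (h0 : 0 ≤ j) (hlt : j < (cs.length : Int))
    (hc : pyCharAt cs j = '[') : findMatchingBracketA cs j = matchGroupB cs '[' ']' j := by
  unfold findMatchingBracketA matchGroupB
  have hneg : ¬ ((cs.length : Int) ≤ j ∨ ¬ pyCharAt cs j = '[') := by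
    push_neg; exact ⟨by omega, hc⟩
  rw [if_neg hneg, initEscB_isEscaped cs j,
    bracketGoA_eq_fwdGoB cs ((cs.length : Int) - j).toNat j 0 h0 le_rfl]

lemma argsGo_eq (cs : List Char) :
    ∀ (k : Nat) (i : Int), 0 ≤ i → argsGoA cs k i = argsGoB cs k i := by
  intro k
  induction k with
  | zero => intro i hi; rfl
  | succ k ih =>
    intro i hi
    simp only [argsGoA, argsGoB]
    rw [skipWsB_eq cs ((cs.length : Int) - i).toNat i le_rfl]
    have hj : i ≤ skipWsA cs i := skipWsA_le cs ((cs.length : Int) - i).toNat i le_rfl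
    set j := skipWsA cs i with hjdef
    split_ifs with hg
    · obtain ⟨hlt, hcb⟩ := hg
      rw [findBrace_eq cs j (by omega) hlt hcb]
      cases hm : matchGroupB cs '{' '}' j with
      | none => rfl
      | some e =>
        have hA : findMatchingBraceA cs j = some e := by
          rw [findBrace_eq cs j (by omega) hlt hcb, hm]
        have hneg : ¬ ((cs.length : Int) ≤ j ∨ ¬ pyCharAt cs j = '{') := by
          push_neg; exact ⟨by omega, hcb⟩
        have hb : braceGoA cs j 0 = some e := by
          unfold findMatchingBraceA at hA
          rwa [if_neg hneg] at hA
        have he : j ≤ e := braceGoA_bound cs ((cs.length : Int) - j).toNat j 0 e le_rfl hb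
        exact ih (e + 1) (by omega)
    · rfl

lemma optional_eq (cs : List Char) (index : Int) (h0 : 0 ≤ index) :
    scanSkipOptionalA cs index =
      (if skipWsB cs index < (cs.length : Int) ∧ pyCharAt cs (skipWsB cs index) = '[' then
        match matchGroupB cs '[' ']' (skipWsB cs index) with
        | none => skipWsB cs index
        | some e => e + 1
      else skipWsB cs index) := by
  simp only [scanSkipOptionalA]
  rw [skipWsB_eq cs ((cs.length : Int) - index).toNat index le_rfl]
  have hj : index ≤ skipWsA cs index := skipWsA_le cs ((cs.length : Int) - index).toNat index le_rfl
  set i := skipWsA cs index with hidef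
  split_ifs with hg
  · obtain ⟨hlt, hcb⟩ := hg
    rw [findBracket_eq cs i (by omega) hlt hcb]
  · rfl

lemma optional_nonneg (cs : List Char) (index : Int) (h0 : 0 ≤ index) :
    0 ≤ scanSkipOptionalA cs index := by
  simp only [scanSkipOptionalA]
  have hj : index ≤ skipWsA cs index := skipWsA_le cs ((cs.length : Int) - index).toNat index le_rfl
  set i := skipWsA cs index with hidef
  split_ifs with hg
  · obtain ⟨hlt, hcb⟩ := hg
    cases hm : findMatchingBracketA cs i with
    | none => simpa using by omega
    | some e =>
      have hneg : ¬ ((cs.length : Int) ≤ i ∨ ¬ pyCharAt cs i = '[') := by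
        push_neg; exact ⟨by omega, hcb⟩
      have hb : bracketGoA cs i 0 = some e := by
        unfold findMatchingBracketA at hm
        rwa [if_neg hneg] at hm
      have he : i ≤ e := bracketGoA_bound cs ((cs.length : Int) - i).toNat i 0 e le_rfl hb
      simp only []
      omega
  · omega

-- ===== VERDICT (by name: the statement is the Claim_ definition above) =====
theorem scan_skip_command_args_py_spec : Claim_equal_scan_skip_command_args_py := by
  unfold Claim_equal_scan_skip_command_args_py
  intro text index command skip_two_args hdom hpre
  unfold Pre_scan_skip_command_args_py at hpre
  unfold Spec_scan_skip_command_args_py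
  unfold scan_skip_command_args_py scan_skip_command_args_py_alt
  simp only []
  rw [← optional_eq text.toList index hpre]
  exact argsGo_eq text.toList _ _ (optional_nonneg text.toList index hpre)
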